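-- pv_equiv track=rewrite | github.com/yesjjin99/AlgoHub | Baekjoon/삼성SW기출/17140.py | r_operation
-- ===== SOURCE A (Python) =====
-- from collections import Counter
--
-- def r_operation(arr):
--     result, tmp = [], []
--     max_len = 0
--     for i, a in enumerate(arr):
--         while 0 in a:
--             a.remove(0)
--
--         c = sorted(Counter(sorted(a)).items(), key=lambda x: (x[1], x[0]))
--         tmp.append(list(sum(c, ())))
--         max_len = max(max_len, len(tmp[i]))
--
--     for t in tmp:
--         if len(t) > 100:
--             result.append(t[:100])
--         else:
--             result.append(t + [0] * (max_len - len(t)))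
--
--     return result, max_len
-- ===== SOURCE B (Python) =====
-- def _runs(s):
--     # run-length encode a sorted list: [(value, run length), ...]
--     if not s:
--         return []
--     v = s[0]
--     i = 1
--     while i < len(s) and s[i] == v:
--         i += 1
--     return [(v, i)] + _runs(s[i:])
--
--
-- def _row(s):
--     pairs = sorted(_runs(s), key=lambda p: (p[1], p[0]))
--     return [x for p in pairs for x in p]
--
--
-- def r_operation(arr):
--     rows, max_len = [], 0
--     for a in arr:
--         a[:] = [x for x in a if x != 0]   # same in-place zero removal as the original
--         row = _row(sorted(a))
--         rows.append(row)
--         if len(row) > max_len: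
--             max_len = len(row)
--     result = [r[:100] if len(r) > 100 else r + [0] * (max_len - len(r)) for r in rows]
--     return result, max_len
-- ===== Notes on version B (the rewrite author's own statement) =====
-- stated objective: alternative
-- what changed: Replaces the repeated membership-test-and-remove zero stripping with a single filter, replaces the Counter dictionary with a recursive run-length encoding of the sorted row, builds rows by comprehension instead of tuple summation with indexed access into the accumulator, and pads via a comprehension with a running max instead of a second append loop.
import Mathlib
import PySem

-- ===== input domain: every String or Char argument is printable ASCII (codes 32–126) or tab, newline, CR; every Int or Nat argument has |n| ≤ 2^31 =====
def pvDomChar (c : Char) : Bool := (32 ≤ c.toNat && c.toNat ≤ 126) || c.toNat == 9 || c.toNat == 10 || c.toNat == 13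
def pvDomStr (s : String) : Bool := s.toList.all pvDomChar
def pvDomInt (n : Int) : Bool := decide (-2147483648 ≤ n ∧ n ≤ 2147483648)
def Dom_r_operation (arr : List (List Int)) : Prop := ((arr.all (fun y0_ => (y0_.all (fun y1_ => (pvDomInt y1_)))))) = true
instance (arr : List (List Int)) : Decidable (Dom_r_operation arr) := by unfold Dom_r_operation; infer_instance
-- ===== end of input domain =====

-- B replaces the while-remove zero strip / Counter dict by a filter plus run-length
-- encoding of the sorted row; equivalence is about the RETURN value (both Pythons
-- mutate each input row in place identically).

-- ===== PORT A =====
-- while 0 in a: a.remove(0)   (a.remove(0) with 0 ∈ a is List.erase: PySem.List.remove?_eq_some_erase)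
def pvStripA (a : List Int) : List Int :=
  if h : (0:Int) ∈ a then pvStripA (a.erase 0) else a
termination_by a.length
decreasing_by exact List.length_erase_of_mem h ▸ Nat.sub_lt (List.length_pos_of_mem h) Nat.one_pos

-- c = sorted(Counter(sorted(a)).items(), key=lambda x: (x[1], x[0])); list(sum(c, ()))
def pvRowA (a : List Int) : List Int :=
  let c := PySem.List.sorted2
      ((PySem.Dict.counter (PySem.List.sorted a (fun x => x) false)).items)
      (fun p => p.2) (fun p => p.1) false
  c.foldl (fun acc p => acc ++ [p.1, p.2]) []

def r_operation (arr : List (List Int)) : List (List Int) × Int :=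
  let st := (PySem.List.enumerate arr 0).foldl
    (fun (st : List (List Int) × Int) ia =>
      let row := pvRowA (pvStripA ia.2)
      let tmp' := st.1 ++ [row]
      (tmp', max st.2 ((PySem.List.pyGetD tmp' ia.1 []).length : Int)))
    ([], 0)
  let result := st.1.foldl (fun res t =>
      if (t.length : Int) > 100 then res ++ [PySem.List.slice t none (some 100)]
      else res ++ [t ++ PySem.List.pyRepeat [0] (st.2 - (t.length : Int))]) []
  (result, st.2)

-- ===== PORT B =====
-- _runs: the while loop counts the leading run (i = 1 + takeWhile length); s[i:] is the dropWhile remainder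
def pvRuns (s : List Int) : List (Int × Int) :=
  match s with
  | [] => []
  | v :: t =>
      (v, (1 + (t.takeWhile (fun x => x == v)).length : Int)) ::
        pvRuns (t.dropWhile (fun x => x == v))
termination_by s.length
decreasing_by exact Nat.lt_succ_of_le (t.length_dropWhile_le _)

def pvRowB (a : List Int) : List Int :=
  let s := PySem.List.sorted (a.filter (fun x => decide (x ≠ 0))) (fun x => x) false
  let pairs := PySem.List.sorted2 (pvRuns s) (fun p => p.2) (fun p => p.1) false
  pairs.flatMap (fun p => [p.1, p.2])

def r_operation_alt (arr : List (List Int)) : List (List Int) × Int :=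
  let st := arr.foldl
    (fun (st : List (List Int) × Int) a =>
      let row := pvRowB a
      (st.1 ++ [row],
       if (row.length : Int) > st.2 then (row.length : Int) else st.2))
    ([], 0)
  (st.1.map (fun r =>
      if (r.length : Int) > 100 then PySem.List.slice r none (some 100)
      else r ++ PySem.List.pyRepeat [0] (st.2 - (r.length : Int))), st.2)

-- ===== PRECONDITION & SPEC =====
def Spec_r_operation (arr : List (List Int)) (out : List (List Int) × Int) : Prop := out = r_operation_alt arr
instance (arr : List (List Int)) (out : List (List Int) × Int) : Decidable (Spec_r_operation arr out) := by unfold Spec_r_operation; infer_instance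

-- ===== CLAIM (what is proved, stated in full; the proofs are below) =====
def Claim_equal_r_operation : Prop := ∀ (arr : List (List Int)), Dom_r_operation arr → Spec_r_operation arr (r_operation arr)

-- ===== LEMMAS AND PROOFS =====

theorem filter_erase_zero (a : List Int) :
    (a.erase 0).filter (fun x => decide (x ≠ 0)) = a.filter (fun x => decide (x ≠ 0)) := by
  induction a with
  | nil => rfl
  | cons x t ih =>
    by_cases hx : x = (0:Int)
    · subst hx; simp
    · rw [List.erase_cons_tail (by simpa using hx)]
      rw [List.filter_cons, List.filter_cons, ih]

theorem pvStripA_eq_filter (a : List Int) : pvStripA a = a.filter (fun x => decide (x ≠ 0)) := by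
  induction a using pvStripA.induct with
  | case1 a h ih => rw [pvStripA, dif_pos h, ih, filter_erase_zero]
  | case2 a h =>
    rw [pvStripA, dif_neg h, Eq.comm, List.filter_eq_self]
    intro x hx
    simp only [decide_eq_true_eq]
    rintro rfl; exact h hx

-- v is not in the dropWhile remainder of a sorted tail whose elements are all ≥ v
theorem not_mem_dropWhile (v : Int) (t : List Int) (hge : ∀ x ∈ t, v ≤ x)
    (hp : t.Pairwise (· ≤ ·)) : v ∉ t.dropWhile (fun x => x == v) := by
  induction t with
  | nil => simp
  | cons y u ih =>
    by_cases hy : y = v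
    · subst hy
      rw [List.dropWhile_cons_of_pos (by simp)]
      exact ih (fun x hx => hge x (List.mem_cons_of_mem _ hx)) hp.tail
    · rw [List.dropWhile_cons_of_neg (by simpa using hy)]
      intro hmem
      rcases List.mem_cons.mp hmem with hmem | hmem
      · exact hy hmem.symm
      · have h1 : y ≤ v := (List.pairwise_cons.mp hp).1 v hmem
        have h2 : v ≤ y := hge y (by simp)
        exact hy (le_antisymm h1 h2)

theorem foldl_add_const (v : Int) (t1 : List Int) (hall : ∀ x ∈ t1, x = v) :
    t1.foldl PySem.Set.add [v] = [v] := by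
  induction t1 with
  | nil => rfl
  | cons y u ih =>
    have hy : y = v := hall y (by simp)
    subst hy
    rw [List.foldl_cons, PySem.Set.add_of_mem (by simp)]
    exact ih (fun x hx => hall x (List.mem_cons_of_mem _ hx))

theorem ofList_cons_not_mem (v : Int) (t2 : List Int) (hv : v ∉ t2) :
    PySem.Set.ofList (v :: t2) = v :: PySem.Set.ofList t2 := by
  rw [PySem.Set.ofList_cons]
  congr 1
  simp [PySem.Set.discard]
  exact fun a ha => ne_of_mem_of_not_mem ha hv

theorem pvRuns_sorted (s : List Int) :
    s.Pairwise (· ≤ ·) →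
    pvRuns s = (PySem.Set.ofList s).map (fun k => (k, (List.count k s : Int))) := by
  induction s using pvRuns.induct with
  | case1 => intro _; simp [pvRuns]
  | case2 v t ih =>
    intro hs
    set t1 := t.takeWhile (fun x => x == v) with ht1
    set t2 := t.dropWhile (fun x => x == v) with ht2
    have ht : t1 ++ t2 = t := List.takeWhile_append_dropWhile
    have hall : ∀ x ∈ t1, x = v := by
      intro x hx
      have := List.mem_takeWhile_imp hx
      simpa using this
    have hge : ∀ x ∈ t, v ≤ x := (List.pairwise_cons.mp hs).1
    have htp : t.Pairwise (· ≤ ·) := (List.pairwise_cons.mp hs).2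
    have ht2p : t2.Pairwise (· ≤ ·) := htp.sublist (List.dropWhile_sublist _)
    have hvnot : v ∉ t2 := not_mem_dropWhile v t hge htp
    -- set side
    have hset : PySem.Set.ofList (v :: t) = v :: PySem.Set.ofList t2 := by
      rw [← ofList_cons_not_mem v t2 hvnot, PySem.Set.ofList_eq_foldl, PySem.Set.ofList_eq_foldl]
      show List.foldl _ (PySem.Set.add [] v) t = List.foldl _ (PySem.Set.add [] v) t2
      have hadd : PySem.Set.add ([] : List Int) v = [v] := rfl
      rw [hadd, ← ht, List.foldl_append, foldl_add_const v t1 hall]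
    -- counts
    have hcv : List.count v (v :: t) = (t1.length : Nat) + 1 := by
      rw [List.count_cons_self, ← ht, List.count_append,
          List.count_eq_zero.mpr hvnot, List.count_eq_length.mpr (fun b hb => (hall b hb).symm)]
    have hck : ∀ k ∈ t2, List.count k (v :: t) = List.count k t2 := by
      intro k hk
      have hkv : k ≠ v := ne_of_mem_of_not_mem hk hvnot
      have h1 : List.count k t1 = 0 := List.count_eq_zero.mpr (fun hmem => hkv (hall k hmem))
      rw [← ht]
      simp [List.count_cons, List.count_append, h1]
      exact fun h => hkv h.symm
    rw [pvRuns, hset, List.map_cons, hcv]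
    congr 1
    · congr 1
      push_cast
      rw [ht1]
      omega
    · rw [ih ht2p]
      apply List.map_congr_left
      intro k hk
      have hk2 : k ∈ t2 := (PySem.Set.mem_ofList _ _).mp hk
      rw [hck k hk2]

theorem pvRow_eq (a : List Int) : pvRowA (pvStripA a) = pvRowB a := by
  rw [pvRowA, pvRowB, pvStripA_eq_filter]
  have hp : (PySem.List.sorted (a.filter (fun x => decide (x ≠ 0))) (fun x => x) false).Pairwise (· ≤ ·) :=
    PySem.List.sorted_pairwise _ (fun x => x)
  rw [PySem.Dict.items_counter, ← pvRuns_sorted _ hp]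
  rw [PySem.List.foldl_append_eq_flatMap (fun p : Int × Int => [p.1, p.2])]
  rfl

theorem loop_eq (arr : List (List Int)) : ∀ (tmp : List (List Int)) (ml : Int) (k : Int),
    k = (tmp.length : Int) →
    (PySem.List.enumerate arr k).foldl
      (fun (st : List (List Int) × Int) ia =>
        (st.1 ++ [pvRowA (pvStripA ia.2)],
         max st.2 ((PySem.List.pyGetD (st.1 ++ [pvRowA (pvStripA ia.2)]) ia.1 []).length : Int)))
      (tmp, ml)
    = arr.foldl
      (fun (st : List (List Int) × Int) a =>
        (st.1 ++ [pvRowB a],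
         if ((pvRowB a).length : Int) > st.2 then ((pvRowB a).length : Int) else st.2))
      (tmp, ml) := by
  induction arr with
  | nil => intro tmp ml k _; rw [PySem.List.enumerate_nil]; rfl
  | cons a rest ih =>
    intro tmp ml k hk
    subst hk
    simp only [PySem.List.enumerate_cons, List.foldl_cons]
    rw [pvRow_eq a]
    have hget : PySem.List.pyGetD (tmp ++ [pvRowB a]) ((tmp.length : Int)) [] = pvRowB a := by
      rw [PySem.List.pyGetD_natCast]
      simp
    rw [hget]
    have hmax : max ml ((pvRowB a).length : Int)
        = if ((pvRowB a).length : Int) > ml then ((pvRowB a).length : Int) else ml := by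
      omega
    rw [hmax]
    have hlen : (tmp.length : Int) + 1 = (((tmp ++ [pvRowB a]).length : Nat) : Int) := by
      simp
    rw [hlen]
    exact ih (tmp ++ [pvRowB a]) _ _ rfl

theorem pad_eq (l : List (List Int)) (m : Int) :
    l.foldl (fun res t =>
        if (t.length : Int) > 100 then res ++ [PySem.List.slice t none (some 100)]
        else res ++ [t ++ PySem.List.pyRepeat [0] (m - (t.length : Int))]) []
    = l.map (fun r =>
        if (r.length : Int) > 100 then PySem.List.slice r none (some 100)
        else r ++ PySem.List.pyRepeat [0] (m - (r.length : Int))) := by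
  have hfn : (fun (res : List (List Int)) t =>
        if (t.length : Int) > 100 then res ++ [PySem.List.slice t none (some 100)]
        else res ++ [t ++ PySem.List.pyRepeat [0] (m - (t.length : Int))])
      = (fun res t => res ++ [if (t.length : Int) > 100 then PySem.List.slice t none (some 100)
        else t ++ PySem.List.pyRepeat [0] (m - (t.length : Int))]) := by
    funext res t; split <;> rfl
  rw [hfn, PySem.List.foldl_append_singleton_eq_map]
  rfl

-- ===== VERDICT (by name: the statement is the Claim_ definition above) =====
theorem r_operation_spec : Claim_equal_r_operation := by
  intro arr _
  show r_operation arr = r_operation_alt arr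
  simp only [r_operation, r_operation_alt]
  rw [loop_eq arr [] 0 0 (by simp), pad_eq]
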